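-- pv_equiv track=rewrite | github.com/VishalDeoPrasad/GeeksforGeeks | Number Pattern.py | numberPattern
-- ===== SOURCE A (Python) =====
-- def numberPattern(N):
--     result = []
--     for i in range(1, N+1):
--         ans = ""
--         for j in range(1, i+1):
--             ans += str(j)
--         for k in range(i-1, 0, -1):
--             ans += str(k)
--         result.append(ans)
--
--     return result
-- ===== SOURCE B (Python) =====
-- def numberPattern(N):
--     result = []
--     s = ""
--     d = ""
--     for i in range(1, N + 1):
--         s += str(i)
--         if i >= 2:
--             d = str(i - 1) + d
--         result.append(s + d)
--     return result
-- ===== Notes on version B (the rewrite author's own statement) =====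
-- stated objective: faster
-- what changed: B keeps two running half-strings (ascending s and descending d) across the single outer loop and appends s+d per row, removing both inner per-row rebuilding loops.
import Mathlib
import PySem

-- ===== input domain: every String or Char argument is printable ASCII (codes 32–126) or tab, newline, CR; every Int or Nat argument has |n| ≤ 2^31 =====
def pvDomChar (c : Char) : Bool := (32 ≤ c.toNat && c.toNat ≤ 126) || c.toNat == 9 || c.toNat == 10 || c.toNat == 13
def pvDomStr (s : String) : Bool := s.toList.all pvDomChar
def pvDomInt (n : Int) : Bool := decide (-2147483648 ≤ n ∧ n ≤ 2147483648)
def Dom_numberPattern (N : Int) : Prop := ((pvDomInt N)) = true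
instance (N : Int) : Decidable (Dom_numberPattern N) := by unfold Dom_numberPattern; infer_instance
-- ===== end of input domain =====

-- B replaces A's two inner per-row loops with two running half-strings carried
-- across the single outer loop (faster: O(N) loop iterations instead of O(N^2)).

-- ===== PORT A =====
def numberPattern (N : Int) : List String :=
  (PySem.List.pyRange 1 (N + 1) 1).foldl (fun result i =>
    let ans := (PySem.List.pyRange 1 (i + 1) 1).foldl (fun a j => a ++ PySem.Int.toStr j) ""
    let ans := (PySem.List.pyRange (i - 1) 0 (-1)).foldl (fun a k => a ++ PySem.Int.toStr k) ans
    result ++ [ans]) []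

-- ===== PORT B =====
def numberPattern_alt (N : Int) : List String :=
  ((PySem.List.pyRange 1 (N + 1) 1).foldl (fun (st : List String × String × String) i =>
    let s := st.2.1 ++ PySem.Int.toStr i
    let d := if 2 ≤ i then PySem.Int.toStr (i - 1) ++ st.2.2 else st.2.2
    (st.1 ++ [s ++ d], s, d)) ([], "", "")).1

-- ===== PRECONDITION & SPEC =====
def Spec_numberPattern (N : Int) (out : List String) : Prop := out = numberPattern_alt N
instance (N : Int) (out : List String) : Decidable (Spec_numberPattern N out) := by unfold Spec_numberPattern; infer_instance

-- ===== CLAIM (what is proved, stated in full; the proofs are below) =====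
def Claim_equal_numberPattern : Prop := ∀ (N : Int), Dom_numberPattern N → Spec_numberPattern N (numberPattern N)

-- ===== LEMMAS AND PROOFS =====

-- folding string-appends from a nonempty start factors through the empty start
theorem pv_foldl_str (l : List Int) (x : String) :
    l.foldl (fun a k => a ++ PySem.Int.toStr k) x
      = x ++ l.foldl (fun a k => a ++ PySem.Int.toStr k) "" := by
  induction l generalizing x with
  | nil => simp
  | cons h t ih =>
    simp only [List.foldl_cons]
    rw [ih (x ++ PySem.Int.toStr h), ih ("" ++ PySem.Int.toStr h)]
    simp [String.append_assoc]

def pvAsc (n : Nat) : String :=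
  (PySem.List.pyRange 1 ((n : Int) + 1) 1).foldl (fun a j => a ++ PySem.Int.toStr j) ""

def pvDesc (n : Nat) : String :=
  (PySem.List.pyRange ((n : Int) - 1) 0 (-1)).foldl (fun a k => a ++ PySem.Int.toStr k) ""

theorem pv_asc_succ (n : Nat) : pvAsc (n + 1) = pvAsc n ++ PySem.Int.toStr ((n : Int) + 1) := by
  unfold pvAsc
  rw [show ((↑(n + 1) : Int) + 1) = ((n : Int) + 1) + 1 by push_cast; ring,
      PySem.List.pyRange_one_succ_right (by omega : (1 : Int) ≤ (n : Int) + 1)]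
  rw [List.foldl_append, pv_foldl_str]
  simp

theorem pv_desc_succ (n : Nat) :
    pvDesc (n + 1) = if 2 ≤ ((n : Int) + 1) then PySem.Int.toStr n ++ pvDesc n else pvDesc n := by
  unfold pvDesc
  by_cases h : 1 ≤ n
  · rw [if_pos (by omega)]
    rw [show ((↑(n + 1) : Int) - 1) = (n : Int) by push_cast; ring,
        PySem.List.pyRange_neg_one_cons (by omega : (0 : Int) < (n : Int))]
    simp only [List.foldl_cons]
    rw [pv_foldl_str]
    simp
  · have hn : n = 0 := by omega
    subst hn
    rw [if_neg (by norm_num)]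
    norm_num [PySem.List.pyRange_neg_one_eq_nil]

theorem pv_invariant (n : Nat) :
    (PySem.List.pyRange 1 ((n : Int) + 1) 1).foldl (fun (st : List String × String × String) i =>
      let s := st.2.1 ++ PySem.Int.toStr i
      let d := if 2 ≤ i then PySem.Int.toStr (i - 1) ++ st.2.2 else st.2.2
      (st.1 ++ [s ++ d], s, d)) ([], "", "")
    = (numberPattern (n : Int), pvAsc n, pvDesc n) := by
  induction n with
  | zero =>
    simp [numberPattern, pvAsc, pvDesc, PySem.List.pyRange_one_eq_nil,
          PySem.List.pyRange_neg_one_eq_nil]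
  | succ m ih =>
    have hsplit : PySem.List.pyRange 1 ((↑(m + 1) : Int) + 1) 1
        = PySem.List.pyRange 1 ((m : Int) + 1) 1 ++ [(m : Int) + 1] := by
      rw [show ((↑(m + 1) : Int) + 1) = ((m : Int) + 1) + 1 by push_cast; ring]
      exact PySem.List.pyRange_one_succ_right (by omega)
    rw [hsplit, List.foldl_append, ih]
    simp only [List.foldl_cons, List.foldl_nil]
    have hrow : numberPattern (↑(m + 1) : Int)
        = numberPattern (m : Int) ++ [pvAsc (m + 1) ++ pvDesc (m + 1)] := by
      unfold numberPattern
      rw [hsplit, List.foldl_append]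
      simp only [List.foldl_cons, List.foldl_nil]
      congr 1
      rw [pv_foldl_str]
      unfold pvAsc pvDesc
      congr 2
    rw [hrow, pv_asc_succ, pv_desc_succ]
    simp only [pvAsc, pvDesc]
    ring_nf

theorem pv_main (N : Int) : numberPattern N = numberPattern_alt N := by
  unfold numberPattern_alt
  by_cases h : N ≤ 0
  · rw [PySem.List.pyRange_one_eq_nil (by omega)]
    unfold numberPattern
    rw [PySem.List.pyRange_one_eq_nil (by omega)]
    rfl
  · have hN : N = (N.toNat : Int) := by omega
    rw [hN, pv_invariant N.toNat]

-- ===== VERDICT (by name: the statement is the Claim_ definition above) =====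
theorem numberPattern_spec : Claim_equal_numberPattern := by
  intro N _
  exact pv_main N
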